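-- pv_equiv track=rewrite | github.com/csiqueirasilva/INF2008 | src/spine_segmentation/commands/download.py | canonical_subset
-- ===== SOURCE A (Python) =====
-- ALIASES = {
--     "hnscc": "HNSCC-3DCT-RT",
--     "hnscc-3dct-rt": "HNSCC-3DCT-RT",
--     "covid": "COVID-19",
--     "covid-19": "COVID-19",
--     "msd": "MSD-T10",
--     "liver": "MSD-T10",
--     "msd-t10": "MSD-T10",
--     "colonog": "COLONOG",
-- }
--
-- def canonical_subset(name: str, subsets):
--     key = name.lower()
--     if key in ALIASES:
--         return ALIASES[key]
--     # try case-insensitive exact match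
--     for s in subsets:
--         if s.lower() == key:
--             return s
--     # try startswith match (e.g., "hnscc" -> "HNSCC-3DCT-RT")
--     for s in subsets:
--         if s.lower().startswith(key):
--             return s
--     return None
-- ===== SOURCE B (Python) =====
-- ALIASES = {
--     "hnscc": "HNSCC-3DCT-RT",
--     "hnscc-3dct-rt": "HNSCC-3DCT-RT",
--     "covid": "COVID-19",
--     "covid-19": "COVID-19",
--     "msd": "MSD-T10",
--     "liver": "MSD-T10",
--     "msd-t10": "MSD-T10",
--     "colonog": "COLONOG",
-- }
--
-- def canonical_subset(name: str, subsets):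
--     key = name.lower()
--     if key in ALIASES:
--         return ALIASES[key]
--     prefix_hit = None
--     for s in subsets:
--         low = s.lower()
--         if low == key:
--             return s
--         if prefix_hit is None and low.startswith(key):
--             prefix_hit = s
--     return prefix_hit
-- ===== Notes on version B (the rewrite author's own statement) =====
-- stated objective: alternative
-- what changed: Replaced A's two sequential scans (exact match pass, then prefix pass) with one single-pass loop that returns on an exact match and records the first prefix match in an accumulator, returned after the loop.
import Mathlib
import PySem

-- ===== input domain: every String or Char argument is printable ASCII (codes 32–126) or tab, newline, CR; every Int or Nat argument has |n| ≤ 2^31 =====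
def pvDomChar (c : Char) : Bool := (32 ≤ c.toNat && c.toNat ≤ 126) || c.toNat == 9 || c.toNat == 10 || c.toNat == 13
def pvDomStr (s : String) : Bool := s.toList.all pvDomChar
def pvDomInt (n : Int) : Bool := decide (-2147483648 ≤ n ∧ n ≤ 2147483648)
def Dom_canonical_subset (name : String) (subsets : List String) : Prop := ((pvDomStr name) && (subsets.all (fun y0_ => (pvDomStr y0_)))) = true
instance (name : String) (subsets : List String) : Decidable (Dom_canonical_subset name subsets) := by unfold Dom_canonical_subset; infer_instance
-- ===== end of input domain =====

-- B replaces A's two sequential scans by one single-pass loop with a first-prefix-match accumulator (objective: alternative decomposition, same cost).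

-- ===== PORT A =====
-- module constant ALIASES (shared by both Pythons)
def pvAliases : PySem.Dict String String :=
  PySem.Dict.ofList [("hnscc", "HNSCC-3DCT-RT"), ("hnscc-3dct-rt", "HNSCC-3DCT-RT"),
   ("covid", "COVID-19"), ("covid-19", "COVID-19"),
   ("msd", "MSD-T10"), ("liver", "MSD-T10"),
   ("msd-t10", "MSD-T10"), ("colonog", "COLONOG")]

-- A's first loop: case-insensitive exact match, first hit
def pvScanExact (key : String) : List String → Option String
  | [] => none
  | s :: rest => if PySem.Str.lower s == key then some s else pvScanExact key rest

-- A's second loop: startswith match, first hit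
def pvScanPrefix (key : String) : List String → Option String
  | [] => none
  | s :: rest => if PySem.Str.startswith (PySem.Str.lower s) key then some s else pvScanPrefix key rest

def canonical_subset (name : String) (subsets : List String) : Option String :=
  let key := PySem.Str.lower name
  match PySem.Dict.get? pvAliases key with
  | some v => some v
  | none =>
    match pvScanExact key subsets with
    | some s => some s
    | none => pvScanPrefix key subsets

-- ===== PORT B =====
-- B's single loop: return on exact match, record first prefix match in prefix_hit
def pvScanOnce (key : String) (prefixHit : Option String) : List String → Option String
  | [] => prefixHit
  | s :: rest =>
    let low := PySem.Str.lower s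
    if low == key then some s
    else if prefixHit == none && PySem.Str.startswith low key then
      pvScanOnce key (some s) rest
    else pvScanOnce key prefixHit rest

def canonical_subset_alt (name : String) (subsets : List String) : Option String :=
  let key := PySem.Str.lower name
  match PySem.Dict.get? pvAliases key with
  | some v => some v
  | none => pvScanOnce key none subsets

-- ===== PRECONDITION & SPEC =====
def Spec_canonical_subset (name : String) (subsets : List String) (out : Option String) : Prop := out = canonical_subset_alt name subsets
instance (name : String) (subsets : List String) (out : Option String) : Decidable (Spec_canonical_subset name subsets out) := by unfold Spec_canonical_subset; infer_instance

-- ===== CLAIM (what is proved, stated in full; the proofs are below) =====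
def Claim_equal_canonical_subset : Prop := ∀ (name : String) (subsets : List String), Dom_canonical_subset name subsets → Spec_canonical_subset name subsets (canonical_subset name subsets)

-- ===== LEMMAS AND PROOFS =====
theorem pvScanOnce_eq (key : String) (hit : Option String) (l : List String) :
    pvScanOnce key hit l =
      match pvScanExact key l with
      | some s => some s
      | none => match hit with
                | some h => some h
                | none => pvScanPrefix key l := by
  induction l generalizing hit with
  | nil => cases hit <;> simp [pvScanOnce, pvScanExact, pvScanPrefix]
  | cons s rest ih =>
    simp only [pvScanOnce, pvScanExact, pvScanPrefix]
    by_cases hx : PySem.Str.lower s == key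
    · simp [hx]
    · simp only [hx]
      cases hit with
      | some h => simp [ih]
      | none =>
        by_cases hp : PySem.Str.startswith (PySem.Str.lower s) key
        all_goals simp only [PySem.Str.startswith_eq, PySem.Str.toList_lower] at hp
        · simp [hp, ih]
        · simp [hp, ih]

-- ===== VERDICT (by name: the statement is the Claim_ definition above) =====
theorem canonical_subset_spec : Claim_equal_canonical_subset := by
  intro name subsets _
  unfold Spec_canonical_subset canonical_subset canonical_subset_alt
  cases h : PySem.Dict.get? pvAliases (PySem.Str.lower name) <;> simp [h, pvScanOnce_eq]
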